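-- pv_equiv track=rewrite | github.com/blancapt20/beatwise | backend/app/features/processing/issue_taxonomy.py | _apply_suppression
-- ===== SOURCE A (Python) =====
-- from typing import Any, Dict, Iterable, List, Optional, Set
--
-- SUPPRESSION_RULES: Dict[str, Set[str]] = {
--     "file_not_found": {
--         "unsupported_format",
--         "corrupted",
--         "truncated_content",
--         "metadata_inconsistency",
--         "fake_bitrate_severe",
--         "fake_bitrate",
--         "low_bitrate",
--         "possible_upscale",
--         "tp_hard_overs",
--         "very_hot_signal",
--         "low_headroom",
--         "too_loud",
--         "too_quiet",
--         "major_clipping",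
--         "moderate_clipping",
--         "minor_clipping",
--         "long_clipping_runs",
--         "overcompressed_master",
--         "low_frequency_content",
--     },
--     "unsupported_format": {
--         "corrupted",
--         "truncated_content",
--         "metadata_inconsistency",
--         "fake_bitrate_severe",
--         "fake_bitrate",
--         "low_bitrate",
--         "possible_upscale",
--         "tp_hard_overs",
--         "very_hot_signal",
--         "low_headroom",
--         "too_loud",
--         "too_quiet",
--         "major_clipping",
--         "moderate_clipping",
--         "minor_clipping",
--         "long_clipping_runs",
--         "overcompressed_master",
--         "low_frequency_content",
--     },
--     "corrupted": {"truncated_content", "metadata_inconsistency", "fake_bitrate", "possible_upscale", "low_bitrate"},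
--     "fake_bitrate_severe": {"fake_bitrate", "possible_upscale", "low_bitrate"},
--     "truncated_content": {"metadata_inconsistency"},
--     "long_clipping_runs": {"major_clipping", "moderate_clipping", "minor_clipping"},
--     "major_clipping": {"moderate_clipping", "minor_clipping"},
--     "tp_hard_overs": {"very_hot_signal", "low_headroom", "too_loud"},
--     "overcompressed_master": {"too_loud"},
-- }
--
-- def _apply_suppression(issues: Iterable[str]) -> List[str]:
--     unique = set(issues)
--     kept = set(unique)
--     for tag in unique:
--         suppressed = SUPPRESSION_RULES.get(tag)
--         if not suppressed:
--             continue
--         for candidate in suppressed: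
--             kept.discard(candidate)
--     return sorted(kept)
-- ===== SOURCE B (Python) =====
-- # Inverted index: for each issue tag, the set of tags whose presence suppresses it.
-- SUPPRESSORS = {
--     "unsupported_format": {"file_not_found"},
--     "corrupted": {"file_not_found", "unsupported_format"},
--     "truncated_content": {"file_not_found", "unsupported_format", "corrupted"},
--     "metadata_inconsistency": {"file_not_found", "unsupported_format", "corrupted", "truncated_content"},
--     "fake_bitrate_severe": {"file_not_found", "unsupported_format"},
--     "fake_bitrate": {"file_not_found", "unsupported_format", "corrupted", "fake_bitrate_severe"},
--     "low_bitrate": {"file_not_found", "unsupported_format", "corrupted", "fake_bitrate_severe"},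
--     "possible_upscale": {"file_not_found", "unsupported_format", "corrupted", "fake_bitrate_severe"},
--     "tp_hard_overs": {"file_not_found", "unsupported_format"},
--     "very_hot_signal": {"file_not_found", "unsupported_format", "tp_hard_overs"},
--     "low_headroom": {"file_not_found", "unsupported_format", "tp_hard_overs"},
--     "too_loud": {"file_not_found", "unsupported_format", "tp_hard_overs", "overcompressed_master"},
--     "too_quiet": {"file_not_found", "unsupported_format"},
--     "major_clipping": {"file_not_found", "unsupported_format", "long_clipping_runs"},
--     "moderate_clipping": {"file_not_found", "unsupported_format", "long_clipping_runs", "major_clipping"},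
--     "minor_clipping": {"file_not_found", "unsupported_format", "long_clipping_runs", "major_clipping"},
--     "long_clipping_runs": {"file_not_found", "unsupported_format"},
--     "overcompressed_master": {"file_not_found", "unsupported_format"},
--     "low_frequency_content": {"file_not_found", "unsupported_format"},
-- }
--
--
-- def _apply_suppression(issues):
--     unique = set(issues)
--     return sorted(
--         tag for tag in unique
--         if SUPPRESSORS.get(tag, frozenset()).isdisjoint(unique)
--     )
-- ===== Notes on version B (the rewrite author's own statement) =====
-- stated objective: alternative
-- what changed: B replaces A's forward pass (for each present tag, discard every tag it suppresses from a copy of the set) by a precomputed inverted index mapping each tag to the set of tags that suppress it, and keeps a tag iff that suppressor set is disjoint from the input.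
import Mathlib
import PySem

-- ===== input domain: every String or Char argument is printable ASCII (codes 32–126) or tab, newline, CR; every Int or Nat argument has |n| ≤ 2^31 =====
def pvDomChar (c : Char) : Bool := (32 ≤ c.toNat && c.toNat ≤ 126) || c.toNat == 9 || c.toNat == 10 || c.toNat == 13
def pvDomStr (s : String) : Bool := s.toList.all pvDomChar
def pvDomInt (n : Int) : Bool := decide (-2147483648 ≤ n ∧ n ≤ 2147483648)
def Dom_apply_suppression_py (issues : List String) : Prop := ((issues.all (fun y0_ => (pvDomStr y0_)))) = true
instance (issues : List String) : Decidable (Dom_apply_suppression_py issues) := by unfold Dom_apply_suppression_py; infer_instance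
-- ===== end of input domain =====

-- B inverts the rule table into a suppressed-tag → suppressors index and keeps a tag iff its
-- suppressor set is disjoint from the input, instead of A's loop discarding candidates per present
-- tag; same sorted result (objective: alternative).

-- ===== PORT A =====
-- SUPPRESSION_RULES (module constant); values are Python set literals, held as their distinct elements.
def suppressionRulesList : List (String × PySem.Set String) :=
  [ ("file_not_found",
      ["unsupported_format", "corrupted", "truncated_content", "metadata_inconsistency",
       "fake_bitrate_severe", "fake_bitrate", "low_bitrate", "possible_upscale",
       "tp_hard_overs", "very_hot_signal", "low_headroom", "too_loud", "too_quiet",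
       "major_clipping", "moderate_clipping", "minor_clipping", "long_clipping_runs",
       "overcompressed_master", "low_frequency_content"]),
    ("unsupported_format",
      ["corrupted", "truncated_content", "metadata_inconsistency", "fake_bitrate_severe",
       "fake_bitrate", "low_bitrate", "possible_upscale", "tp_hard_overs",
       "very_hot_signal", "low_headroom", "too_loud", "too_quiet", "major_clipping",
       "moderate_clipping", "minor_clipping", "long_clipping_runs",
       "overcompressed_master", "low_frequency_content"]),
    ("corrupted", ["truncated_content", "metadata_inconsistency", "fake_bitrate", "possible_upscale", "low_bitrate"]),
    ("fake_bitrate_severe", ["fake_bitrate", "possible_upscale", "low_bitrate"]),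
    ("truncated_content", ["metadata_inconsistency"]),
    ("long_clipping_runs", ["major_clipping", "moderate_clipping", "minor_clipping"]),
    ("major_clipping", ["moderate_clipping", "minor_clipping"]),
    ("tp_hard_overs", ["very_hot_signal", "low_headroom", "too_loud"]),
    ("overcompressed_master", ["too_loud"]) ]

def suppressionRules : PySem.Dict String (PySem.Set String) := ⟨suppressionRulesList⟩

-- literal port of A: kept starts as a copy of unique; for each tag, look the tag up, skip a missing
-- or empty entry ('if not suppressed: continue'), else discard each candidate from kept; sort.
-- (A iterates over the Python set 'unique' in hash order; the result is order-independent: the final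
-- kept set and the sorted output do not depend on the iteration order, so the fold over the Set's
-- element list is exact.)
def apply_suppression_py (issues : List String) : List String :=
  let unique : PySem.Set String := PySem.Set.ofList issues
  let kept : PySem.Set String :=
    unique.foldl (fun kept tag =>
      match PySem.Dict.get? suppressionRules tag with
      | none => kept
      | some suppressed =>
          if suppressed.isEmpty then kept
          else suppressed.foldl PySem.Set.discard kept) unique
  PySem.List.sorted kept (fun x => x) false

-- ===== PORT B =====
-- SUPPRESSORS (module constant of Source B): inverted index, suppressed tag → tags that suppress it.
def suppressorsList : List (String × PySem.Set String) :=
  [ ("unsupported_format", ["file_not_found"]),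
    ("corrupted", ["file_not_found", "unsupported_format"]),
    ("truncated_content", ["file_not_found", "unsupported_format", "corrupted"]),
    ("metadata_inconsistency", ["file_not_found", "unsupported_format", "corrupted", "truncated_content"]),
    ("fake_bitrate_severe", ["file_not_found", "unsupported_format"]),
    ("fake_bitrate", ["file_not_found", "unsupported_format", "corrupted", "fake_bitrate_severe"]),
    ("low_bitrate", ["file_not_found", "unsupported_format", "corrupted", "fake_bitrate_severe"]),
    ("possible_upscale", ["file_not_found", "unsupported_format", "corrupted", "fake_bitrate_severe"]),
    ("tp_hard_overs", ["file_not_found", "unsupported_format"]),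
    ("very_hot_signal", ["file_not_found", "unsupported_format", "tp_hard_overs"]),
    ("low_headroom", ["file_not_found", "unsupported_format", "tp_hard_overs"]),
    ("too_loud", ["file_not_found", "unsupported_format", "tp_hard_overs", "overcompressed_master"]),
    ("too_quiet", ["file_not_found", "unsupported_format"]),
    ("major_clipping", ["file_not_found", "unsupported_format", "long_clipping_runs"]),
    ("moderate_clipping", ["file_not_found", "unsupported_format", "long_clipping_runs", "major_clipping"]),
    ("minor_clipping", ["file_not_found", "unsupported_format", "long_clipping_runs", "major_clipping"]),
    ("long_clipping_runs", ["file_not_found", "unsupported_format"]),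
    ("overcompressed_master", ["file_not_found", "unsupported_format"]),
    ("low_frequency_content", ["file_not_found", "unsupported_format"]) ]

def suppressors : PySem.Dict String (PySem.Set String) := ⟨suppressorsList⟩

-- port of B: keep each unique tag whose suppressor set misses the input entirely; sort.
-- (the generator runs over the set 'unique' in hash order; filtering a set and sorting the result
-- without a key is order-independent, so the filter over the Set's element list is exact.)
def apply_suppression_py_alt (issues : List String) : List String :=
  let unique : PySem.Set String := PySem.Set.ofList issues
  PySem.List.sorted
    (unique.filter (fun tag =>
      PySem.Set.isdisjoint (PySem.Dict.getD suppressors tag PySem.Set.empty) unique))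
    (fun x => x) false

-- ===== PRECONDITION & SPEC =====
def Spec_apply_suppression_py (issues : List String) (out : List String) : Prop := out = apply_suppression_py_alt issues
instance (issues : List String) (out : List String) : Decidable (Spec_apply_suppression_py issues out) := by unfold Spec_apply_suppression_py; infer_instance

-- ===== CLAIM (what is proved, stated in full; the proofs are below) =====
def Claim_equal_apply_suppression_py : Prop := ∀ (issues : List String), Dom_apply_suppression_py issues → Spec_apply_suppression_py issues (apply_suppression_py issues)

-- ===== LEMMAS AND PROOFS =====

-- the (suppressor, suppressed) pairs an assoc list of sets encodes
def rulePairs (d : List (String × PySem.Set String)) : List (String × String) :=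
  d.flatMap (fun p => p.2.map (fun x => (p.1, x)))

-- membership in a dict-of-sets lookup, as membership in its pair list (keys must be distinct)
theorem mem_getD_iff_pairs (d : List (String × PySem.Set String))
    (hk : (d.map Prod.fst).Nodup) (k x : String) :
    x ∈ PySem.Dict.getD ⟨d⟩ k PySem.Set.empty ↔ (k, x) ∈ rulePairs d := by
  induction d with
  | nil => simp [PySem.Dict.getD, PySem.Dict.get?, rulePairs, PySem.Set.empty]
  | cons p rest ih =>
      obtain ⟨k0, v0⟩ := p
      simp only [List.map_cons, List.nodup_cons, List.mem_map] at hk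
      simp only [PySem.Dict.getD, PySem.Dict.get?_mk_cons, rulePairs, List.flatMap_cons,
        List.mem_append, List.mem_map]
      by_cases h : k0 = k
      · subst h
        simp only [beq_self_eq_true, if_pos, Option.getD_some]
        constructor
        · intro hx; exact Or.inl ⟨x, hx, rfl⟩
        · rintro (⟨y, hy, he⟩ | hmem)
          · cases he; exact hy
          · exfalso
            apply hk.1
            rcases List.mem_flatMap.mp hmem with ⟨q, hq, hx⟩
            rcases List.mem_map.mp hx with ⟨y, _, he⟩
            exact ⟨q, hq, (congrArg Prod.fst he)⟩
      · have hb : (k0 == k) = false := beq_false_of_ne h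
        rw [hb]
        simp only [Bool.false_eq_true, if_false]
        have ih' := ih hk.2
        simp only [PySem.Dict.getD, rulePairs] at ih'
        rw [ih']
        constructor
        · intro hx; exact Or.inr hx
        · rintro (⟨y, _, he⟩ | hmem)
          · exact absurd (congrArg Prod.fst he) h
          · exact hmem
      
-- the two literal tables encode the same relation, with the roles swapped
theorem rulePairs_swap_forward :
    ∀ p ∈ rulePairs suppressionRulesList, (p.2, p.1) ∈ rulePairs suppressorsList := by decide

theorem rulePairs_swap_backward :
    ∀ p ∈ rulePairs suppressorsList, (p.2, p.1) ∈ rulePairs suppressionRulesList := by decide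

-- the suppression set A consults for a tag: the dict entry, or the empty set
def ruleList (tag : String) : PySem.Set String :=
  (PySem.Dict.get? suppressionRules tag).getD PySem.Set.empty

-- the BRIDGE: x is suppressed by tag in A's table iff tag is a suppressor of x in B's table
theorem mem_rule_iff_mem_supp (tag x : String) :
    x ∈ ruleList tag ↔ tag ∈ PySem.Dict.getD suppressors x PySem.Set.empty := by
  have h1 := mem_getD_iff_pairs suppressionRulesList (by decide) tag x
  have h2 := mem_getD_iff_pairs suppressorsList (by decide) x tag
  rw [show ruleList tag = PySem.Dict.getD ⟨suppressionRulesList⟩ tag PySem.Set.empty from rfl, h1,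
    show suppressors = (⟨suppressorsList⟩ : PySem.Dict String (PySem.Set String)) from rfl, h2]
  exact ⟨fun h => rulePairs_swap_forward _ h, fun h => rulePairs_swap_backward _ h⟩

-- discarding every element of l from s is one filter over s
theorem foldl_discard_eq_filter (l : List String) (s : PySem.Set String) :
    l.foldl PySem.Set.discard s = s.filter (fun x => !l.contains x) := by
  induction l generalizing s with
  | nil => simp
  | cons a t ih =>
      simp only [List.foldl_cons, ih, PySem.Set.discard, List.filter_filter]
      apply List.filter_congr
      intro x _
      by_cases hxa : x = a
      · subst hxa; simp
      · simp [hxa, Bool.and_comm]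

-- A's loop body is one filter over kept, against the tag's rule list
theorem bodyA_eq_filter (kept : PySem.Set String) (tag : String) :
    (match PySem.Dict.get? suppressionRules tag with
      | none => kept
      | some suppressed =>
          if suppressed.isEmpty then kept
          else suppressed.foldl PySem.Set.discard kept)
      = kept.filter (fun x => !(ruleList tag).contains x) := by
  unfold ruleList
  cases h : PySem.Dict.get? suppressionRules tag with
  | none => simp [PySem.Set.empty]
  | some supp =>
      simp only [Option.getD_some]
      by_cases he : supp.isEmpty
      · simp [List.isEmpty_iff.mp he]
      · simp [he, foldl_discard_eq_filter]

-- a fold of filters is one filter with the conjunction of the tests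
theorem foldl_filter_eq_filter_all (p : String → String → Bool) (l : List String)
    (s : List String) :
    l.foldl (fun s tag => s.filter (p tag)) s
      = s.filter (fun x => l.all (fun tag => p tag x)) := by
  induction l generalizing s with
  | nil => simp
  | cons a t ih =>
      simp only [List.foldl_cons, ih, List.filter_filter, List.all_cons]
      apply List.filter_congr
      intro x _
      simp [Bool.and_comm]

-- the pre-sort lists of the two ports are literally the same list
theorem kept_eq_filter_disjoint (issues : List String) :
    (PySem.Set.ofList issues).foldl (fun kept tag =>
        match PySem.Dict.get? suppressionRules tag with
        | none => kept
        | some suppressed =>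
            if suppressed.isEmpty then kept
            else suppressed.foldl PySem.Set.discard kept) (PySem.Set.ofList issues)
      = (PySem.Set.ofList issues).filter (fun tag =>
          PySem.Set.isdisjoint (PySem.Dict.getD suppressors tag PySem.Set.empty)
            (PySem.Set.ofList issues)) := by
  have h1 : ((PySem.Set.ofList issues).foldl (fun kept tag =>
      match PySem.Dict.get? suppressionRules tag with
      | none => kept
      | some suppressed =>
          if suppressed.isEmpty then kept
          else suppressed.foldl PySem.Set.discard kept) (PySem.Set.ofList issues))
      = (PySem.Set.ofList issues).foldl
          (fun s tag => s.filter (fun x => !(ruleList tag).contains x)) (PySem.Set.ofList issues) := by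
    apply PySem.List.foldl_congr_mem
    intro acc tag _
    exact bodyA_eq_filter acc tag
  rw [h1, foldl_filter_eq_filter_all (fun tag x => !(ruleList tag).contains x)]
  apply List.filter_congr
  intro x _
  rw [Bool.eq_iff_iff]
  simp only [List.all_eq_true, Bool.not_eq_eq_eq_not, Bool.not_true, PySem.Set.isdisjoint,
    List.any_eq_false]
  constructor
  · intro h u hu hmem
    have hu' : u ∈ PySem.Set.ofList issues := by
      simp only [PySem.Set.contains, List.contains_eq_mem, decide_eq_true_eq] at hmem; exact hmem
    have hfalse := h u hu'
    simp only [PySem.Set.contains, List.contains_eq_mem, decide_eq_false_iff_not] at hfalse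
    exact hfalse ((mem_rule_iff_mem_supp u x).mpr hu)
  · intro h tag htag
    simp only [PySem.Set.contains, List.contains_eq_mem, decide_eq_false_iff_not]
    intro hx
    exact h tag ((mem_rule_iff_mem_supp tag x).mp hx)
      (by simp only [PySem.Set.contains, List.contains_eq_mem]; exact decide_eq_true htag)

-- ===== VERDICT (by name: the statement is the Claim_ definition above) =====
theorem apply_suppression_py_spec : Claim_equal_apply_suppression_py := by
  intro issues _
  unfold Spec_apply_suppression_py
  simp only [apply_suppression_py, apply_suppression_py_alt]
  rw [kept_eq_filter_disjoint]
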